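-- pv_equiv track=rewrite | github.com/wasdw1012/RSA-LLL-2.0 | mvp19_signature_cvp.py | _generate_corners
-- ===== SOURCE A (Python) =====
-- from typing import Any, Callable, Dict, Iterable, List, Optional, Protocol, Sequence, Tuple, Union, TYPE_CHECKING
--
-- def _generate_corners(
--
--     lower: List[int],
--     upper: List[int]
-- ) -> List[Tuple[int, ...]]:
--     """生成边界框的所有角点。"""
--     dim = len(lower)
--     corners: List[Tuple[int, ...]] = []
--
--     for mask in range(1 << dim):
--         corner = tuple(
--             upper[i] if (mask >> i) & 1 else lower[i]
--             for i in range(dim)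
--         )
--         corners.append(corner)
--
--     return corners
-- ===== SOURCE B (Python) =====
-- def _generate_corners(lower, upper):
--     """Iteratively build the corner list dimension by dimension:
--     each step doubles the list, keeping coordinate 0 varying fastest."""
--     corners = [()]
--     for lo, up in zip(lower, upper):
--         corners = [c + (v,) for v in (lo, up) for c in corners]
--     return corners
-- ===== Notes on version B (the rewrite author's own statement) =====
-- stated objective: simpler
-- what changed: Replaced the 2^dim bitmask loop with per-mask bit tests by an iterative cartesian product over zip(lower, upper) that doubles the corner list once per dimension (coordinate 0 varying fastest).
import Mathlib
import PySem

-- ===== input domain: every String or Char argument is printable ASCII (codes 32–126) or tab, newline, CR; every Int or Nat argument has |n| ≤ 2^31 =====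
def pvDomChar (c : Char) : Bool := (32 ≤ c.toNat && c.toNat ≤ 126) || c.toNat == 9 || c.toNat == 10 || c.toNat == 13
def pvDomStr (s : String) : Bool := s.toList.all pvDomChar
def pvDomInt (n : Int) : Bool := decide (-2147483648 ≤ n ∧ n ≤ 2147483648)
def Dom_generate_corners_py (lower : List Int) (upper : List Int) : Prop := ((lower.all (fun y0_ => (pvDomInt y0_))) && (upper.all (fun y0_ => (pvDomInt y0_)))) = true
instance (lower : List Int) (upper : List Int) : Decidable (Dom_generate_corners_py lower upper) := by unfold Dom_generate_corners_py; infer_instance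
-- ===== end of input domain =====

-- B replaces A's bitmask enumeration by an iterative per-dimension product (doubling the
-- corner list once per dimension, coordinate 0 varying fastest): simpler, same output.

-- ===== PORT A =====
-- `1 << dim` is `(1 : Int) <<< dim`, `mask >> i` is `mask >>> i.toNat` (i comes from
-- range(dim), so i ≥ 0 and .toNat is exact), `& 1` is PySem.Int.band; indexing uses
-- pyGetD (in range for every admitted input, see Pre_).
def generate_corners_py (lower : List Int) (upper : List Int) : List (List Int) :=
  let dim := lower.length
  (PySem.List.pyRange 0 ((1 : Int) <<< dim) 1).foldl
    (fun corners mask =>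
      corners ++ [(PySem.List.pyRange 0 (dim : Int) 1).map (fun i =>
        if PySem.Int.band (mask >>> i.toNat) 1 = 1
        then PySem.List.pyGetD upper i 0
        else PySem.List.pyGetD lower i 0)])
    []

-- ===== PORT B =====
-- fold over zip lower upper: each step maps `[c + (v,) for v in (lo, up) for c in corners]`.
def generate_corners_py_alt (lower : List Int) (upper : List Int) : List (List Int) :=
  (lower.zip upper).foldl
    (fun corners p => [p.1, p.2].flatMap (fun v => corners.map (fun c => c ++ [v])))
    [[]]

-- ===== PRECONDITION & SPEC =====
-- Pre_ excludes inputs where upper is shorter than a nonempty lower: there A raises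
-- IndexError at upper[i] (B's zip instead truncates to the common length).
def Pre_generate_corners_py (lower : List Int) (upper : List Int) : Prop :=
  lower = [] ∨ lower.length ≤ upper.length
instance (lower : List Int) (upper : List Int) : Decidable (Pre_generate_corners_py lower upper) := by unfold Pre_generate_corners_py; infer_instance
def pvWitness_generate_corners_py : List Int × List Int := ([1, 2], [3, 4])

def Spec_generate_corners_py (lower : List Int) (upper : List Int) (out : List (List Int)) : Prop := out = generate_corners_py_alt lower upper
instance (lower : List Int) (upper : List Int) (out : List (List Int)) : Decidable (Spec_generate_corners_py lower upper out) := by unfold Spec_generate_corners_py; infer_instance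

-- ===== CLAIM (what is proved, stated in full; the proofs are below) =====
def Claim_equal_generate_corners_py : Prop := ∀ (lower : List Int) (upper : List Int), Dom_generate_corners_py lower upper → Pre_generate_corners_py lower upper → Spec_generate_corners_py lower upper (generate_corners_py lower upper)

-- ===== LEMMAS AND PROOFS =====

-- A's corner for a Nat mask, in Nat-indexed form.
def pvCorner (lower upper : List Int) (m : Nat) : List Int :=
  (List.range lower.length).map (fun i =>
    if (m >>> i) &&& 1 = 1 then upper.getD i 0 else lower.getD i 0)

-- B's per-pair product, recursively (last pair slowest).
def pvTup : List (Int × Int) → List (List Int)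
  | [] => [[]]
  | p :: ps => (pvTup ps).flatMap (fun t => [p.1 :: t, p.2 :: t])

lemma pvA_char (lower upper : List Int) :
    generate_corners_py lower upper =
      (List.range (2 ^ lower.length)).map (pvCorner lower upper) := by
  unfold generate_corners_py
  rw [PySem.List.foldl_append_singleton_eq_map]
  have h1 : ((1 : Int) <<< lower.length) = ((2 ^ lower.length : Nat) : Int) := by
    rw [Int.shiftLeft_eq]; push_cast; ring
  rw [h1, PySem.List.pyRange_zero_nat, PySem.List.pyRange_zero_nat, List.map_map]
  refine List.map_congr_left (fun m _ => ?_)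
  simp only [Function.comp, List.map_map]
  refine List.map_congr_left (fun j _ => ?_)
  simp only [Function.comp, PySem.List.pyGetD_natCast, Int.toNat_natCast]
  rw [show ((m : Int) >>> j) = (((m >>> j : Nat)) : Int) from by simp [Int.natCast_shiftRight],
    show PySem.Int.band (((m >>> j : Nat)) : Int) 1 = (((m >>> j) &&& 1 : Nat) : Int) from
      by exact_mod_cast PySem.Int.band_natCast (m >>> j) 1]
  simp only [Nat.cast_eq_one]

lemma pvRange_two_mul (n : Nat) :
    List.range (2 * n) = (List.range n).flatMap (fun q => [2 * q, 2 * q + 1]) := by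
  induction n with
  | zero => rfl
  | succ k ih =>
    have h : 2 * (k + 1) = (2 * k + 1) + 1 := by ring
    rw [h, List.range_succ, List.range_succ, List.range_succ, ih]
    simp

lemma pvCorner_cons (x y : Int) (ls us : List Int) (q b : Nat) (hb : b < 2) :
    pvCorner (x :: ls) (y :: us) (2 * q + b) =
      (if b = 1 then y else x) :: pvCorner ls us q := by
  unfold pvCorner
  rw [show (x :: ls).length = ls.length + 1 from rfl, List.range_succ_eq_map]
  simp only [List.map_cons, List.map_map]
  congr 1
  · have hb' : (2 * q + b) >>> 0 &&& 1 = b := by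
      rw [Nat.shiftRight_zero, Nat.and_one_is_mod]; omega
    rw [hb']
    simp
  · refine List.map_congr_left (fun i _ => ?_)
    have : (2 * q + b) >>> (i + 1) = q >>> i := by
      rw [Nat.add_comm i 1, Nat.shiftRight_add, Nat.shiftRight_one]
      congr 1; omega
    simp [Function.comp, this]

lemma pvB_foldl (ps : List (Int × Int)) (acc : List (List Int)) :
    ps.foldl (fun corners p => [p.1, p.2].flatMap (fun v => corners.map (fun c => c ++ [v]))) acc
      = (pvTup ps).flatMap (fun s => acc.map (fun c => c ++ s)) := by
  induction ps generalizing acc with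
  | nil => simp [pvTup]
  | cons p ps ih =>
    rw [List.foldl_cons, ih, pvTup]
    simp [List.flatMap_assoc, Function.comp_def, List.append_assoc]

lemma pvB_char (lower upper : List Int) :
    generate_corners_py_alt lower upper = pvTup (lower.zip upper) := by
  unfold generate_corners_py_alt
  rw [pvB_foldl]
  simp

lemma pvMain (lower : List Int) : ∀ upper : List Int, lower.length ≤ upper.length →
    (List.range (2 ^ lower.length)).map (pvCorner lower upper) = pvTup (lower.zip upper) := by
  induction lower with
  | nil => intro upper _; simp [pvCorner, pvTup]
  | cons x ls ih =>
    intro upper hlen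
    cases upper with
    | nil => simp at hlen
    | cons y us =>
      have hlen' : ls.length ≤ us.length := by simpa using hlen
      rw [show (x :: ls).length = ls.length + 1 from rfl, pow_succ, Nat.mul_comm,
        pvRange_two_mul, List.map_flatMap, show (x :: ls).zip (y :: us) = (x, y) :: ls.zip us from rfl,
        pvTup, ← ih us hlen']
      rw [List.flatMap_map]
      refine List.flatMap_congr (fun q _ => ?_)
      rw [show [2 * q, 2 * q + 1].map (pvCorner (x :: ls) (y :: us)) =
        [pvCorner (x :: ls) (y :: us) (2 * q + 0), pvCorner (x :: ls) (y :: us) (2 * q + 1)] from by simp]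
      rw [pvCorner_cons x y ls us q 0 (by omega), pvCorner_cons x y ls us q 1 (by omega)]
      simp

-- ===== VERDICT (by name: the statement is the Claim_ definition above) =====
theorem generate_corners_py_spec : Claim_equal_generate_corners_py := by
  intro lower upper _ hpre
  unfold Spec_generate_corners_py
  rw [pvA_char, pvB_char]
  rcases hpre with h | h
  · subst h; simp [pvCorner, pvTup]
  · exact pvMain lower upper h
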